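-- pv_equiv track=rewrite | github.com/Association-of-stupid-people/tool-gen-level-snake-out | server/app/services/difficulty_calculator.py | check_movable
-- ===== SOURCE A (Python) =====
-- def check_movable(snake, all_snakes, obstacles_map, rows, cols):
--     """Check if snake head can move in any direction"""
--     path = snake.get('path', [])
--     if not path: return False
--
--     def get_rc(p):
--         if isinstance(p, dict): return p.get('row'), p.get('col')
--         return p[0], p[1]
--
--     head_r, head_c = get_rc(path[-1])
--
--     neighbors = [
--         (head_r - 1, head_c), (head_r + 1, head_c),
--         (head_r, head_c - 1), (head_r, head_c + 1)
--     ]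
--
--     for nr, nc in neighbors:
--         if nr < 0 or nr >= rows or nc < 0 or nc >= cols:
--             continue
--
--         if (nr, nc) in obstacles_map:
--             obs = obstacles_map[(nr, nc)]
--             o_type = obs.get('type')
--             if o_type in ['wall', 'wall_break', 'iced_snake', 'key_snake']:
--                 continue
--
--         is_blocked_by_snake = False
--         for s in all_snakes:
--             s_path = s.get('path', [])
--             for p in s_path:
--                 sr, sc = get_rc(p)
--                 if sr == nr and sc == nc:
--                     is_blocked_by_snake = True
--                     break
--             if is_blocked_by_snake: break
--
--         if is_blocked_by_snake:
--             continue
--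
--         return True
--
--     return False
-- ===== SOURCE B (Python) =====
-- def check_movable(snake, all_snakes, obstacles_map, rows, cols):
--     """Check if snake head can move: instead of testing each neighbor against
--     obstacles and snakes, start from the set of in-bounds neighbor cells and
--     subtract blocking-obstacle cells and snake-occupied cells; movable iff any
--     candidate cell survives."""
--     path = snake.get('path', [])
--     if not path:
--         return False
--
--     def get_rc(p):
--         if isinstance(p, dict):
--             return p.get('row'), p.get('col')
--         return p[0], p[1]
--
--     hr, hc = get_rc(path[-1])
--     candidates = {(nr, nc)
--                   for nr, nc in ((hr - 1, hc), (hr + 1, hc), (hr, hc - 1), (hr, hc + 1))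
--                   if 0 <= nr < rows and 0 <= nc < cols}
--     blocking = {'wall', 'wall_break', 'iced_snake', 'key_snake'}
--     for cell in obstacles_map:
--         if obstacles_map[cell].get('type') in blocking:
--             candidates.discard(cell)
--     for s in all_snakes:
--         for p in s.get('path', []):
--             candidates.discard(get_rc(p))
--     return bool(candidates)
-- ===== Notes on version B (the rewrite author's own statement) =====
-- stated objective: alternative
-- what changed: B inverts the loop structure: instead of A's scan over the 4 neighbors with a nested per-neighbor rescan of every snake and an obstacle lookup, B builds the set of in-bounds neighbor cells once and then iterates the obstacles dict and all snake paths, subtracting blocked/occupied cells from that set; the answer is whether any candidate survives.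
import Mathlib
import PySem

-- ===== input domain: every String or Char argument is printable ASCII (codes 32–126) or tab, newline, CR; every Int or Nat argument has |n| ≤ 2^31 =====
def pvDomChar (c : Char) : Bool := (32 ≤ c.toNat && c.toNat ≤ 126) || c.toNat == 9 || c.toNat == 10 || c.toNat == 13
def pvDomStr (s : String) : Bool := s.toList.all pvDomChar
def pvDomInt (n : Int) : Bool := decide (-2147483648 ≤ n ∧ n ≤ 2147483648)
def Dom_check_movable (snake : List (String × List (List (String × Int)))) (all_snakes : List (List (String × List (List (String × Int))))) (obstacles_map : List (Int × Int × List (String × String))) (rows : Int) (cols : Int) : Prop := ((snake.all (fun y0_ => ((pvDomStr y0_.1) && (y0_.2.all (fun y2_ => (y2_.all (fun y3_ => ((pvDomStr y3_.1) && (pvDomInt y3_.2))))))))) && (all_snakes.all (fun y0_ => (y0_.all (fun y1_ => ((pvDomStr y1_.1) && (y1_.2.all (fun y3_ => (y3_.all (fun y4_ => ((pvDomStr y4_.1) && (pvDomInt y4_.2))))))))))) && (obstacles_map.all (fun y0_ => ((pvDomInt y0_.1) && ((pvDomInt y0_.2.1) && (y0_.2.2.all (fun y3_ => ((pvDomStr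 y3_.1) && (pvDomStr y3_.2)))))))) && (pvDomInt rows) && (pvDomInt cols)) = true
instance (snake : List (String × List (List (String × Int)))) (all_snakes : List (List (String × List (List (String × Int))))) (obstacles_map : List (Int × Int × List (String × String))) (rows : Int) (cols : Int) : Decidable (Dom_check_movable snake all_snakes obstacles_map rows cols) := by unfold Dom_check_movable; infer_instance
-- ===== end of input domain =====

-- B inverts the loops: it builds the set of in-bounds neighbor cells once and subtracts
-- blocking-obstacle and snake-occupied cells by iterating obstacles and snakes, instead of
-- A's per-neighbor rescans (objective: alternative; same cost class).

-- ===== PORT A =====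
-- get_rc(p): the points in this typed domain are dicts {'row': …, 'col': …}; .get returns Option
def pvGetRC (p : List (String × Int)) : Option Int × Option Int :=
  ((PySem.Dict.mk p).get? "row", (PySem.Dict.mk p).get? "col")

-- '(nr, nc) in obstacles_map' / 'obstacles_map[(nr, nc)]' — first-match dict lookup keyed by the pair
def pvObsLookup? (m : List (Int × Int × List (String × String))) (nr nc : Int) :
    Option (List (String × String)) :=
  (PySem.Dict.mk (m.map (fun t => ((t.1, t.2.1), t.2.2)))).get? (nr, nc)

-- A's nested snake scan with break: 'any' over snakes, 'any' over each path
def pvBlockedBySnake (all_snakes : List (List (String × List (List (String × Int))))) (nr nc : Int) : Bool :=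
  all_snakes.any (fun s =>
    ((PySem.Dict.mk s).getD "path" []).any (fun p => pvGetRC p == (some nr, some nc)))

-- "o_type in ['wall', 'wall_break', 'iced_snake', 'key_snake']" (o_type may be None = none)
def pvObsBlocks (obs : List (String × String)) : Bool :=
  let o_type := (PySem.Dict.mk obs).get? "type"
  o_type == some "wall" || o_type == some "wall_break" || o_type == some "iced_snake" || o_type == some "key_snake"

-- the 'for nr, nc in neighbors' loop with its three 'continue's and early 'return True'
def pvLoopA (all_snakes : List (List (String × List (List (String × Int)))))
    (obstacles_map : List (Int × Int × List (String × String))) (rows cols : Int) :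
    List (Int × Int) → Bool
  | [] => false
  | (nr, nc) :: rest =>
    if nr < 0 || rows ≤ nr || nc < 0 || cols ≤ nc then
      pvLoopA all_snakes obstacles_map rows cols rest
    else if (match pvObsLookup? obstacles_map nr nc with
             | some obs => pvObsBlocks obs
             | none => false) then
      pvLoopA all_snakes obstacles_map rows cols rest
    else if pvBlockedBySnake all_snakes nr nc then
      pvLoopA all_snakes obstacles_map rows cols rest
    else
      true

def check_movable (snake : List (String × List (List (String × Int)))) (all_snakes : List (List (String × List (List (String × Int))))) (obstacles_map : List (Int × Int × List (String × String))) (rows : Int) (cols : Int) : Bool :=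
  let path := (PySem.Dict.mk snake).getD "path" []
  match path.getLast? with
  | none => false           -- 'if not path: return False'
  | some head =>
    match pvGetRC head with
    | (some hr, some hc) =>
      pvLoopA all_snakes obstacles_map rows cols
        [(hr - 1, hc), (hr + 1, hc), (hr, hc - 1), (hr, hc + 1)]
    | _ => false            -- Python raises TypeError here (None - 1); excluded by Pre_

-- ===== PORT B =====
def pvRC (p : List (String × Int)) : Option Int × Option Int :=
  ((PySem.Dict.mk p).get? "row", (PySem.Dict.mk p).get? "col")

def pvBlockingSet : PySem.Set String :=
  PySem.Set.ofList ["wall", "wall_break", "iced_snake", "key_snake"]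

def check_movable_alt (snake : List (String × List (List (String × Int)))) (all_snakes : List (List (String × List (List (String × Int))))) (obstacles_map : List (Int × Int × List (String × String))) (rows : Int) (cols : Int) : Bool :=
  let path := (PySem.Dict.mk snake).getD "path" []
  path.getLast?.elim false (fun head =>   -- 'if not path: return False'
    (pvRC head).1.elim false (fun hr => (pvRC head).2.elim false (fun hc =>
      -- candidates = {(nr, nc) for … if 0 <= nr < rows and 0 <= nc < cols}
      let candidates : PySem.Set (Option Int × Option Int) :=
        PySem.Set.ofList
          ((([(hr - 1, hc), (hr + 1, hc), (hr, hc - 1), (hr, hc + 1)]).filter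
              (fun q => decide (0 ≤ q.1) && decide (q.1 < rows) && decide (0 ≤ q.2) && decide (q.2 < cols))).map
            (fun q => ((some q.1, some q.2) : Option Int × Option Int)))
      let d := PySem.Dict.mk (obstacles_map.map (fun t => ((t.1, t.2.1), t.2.2)))
      -- for cell in obstacles_map: if obstacles_map[cell].get('type') in blocking: candidates.discard(cell)
      let c1 := d.keys.foldl (fun s k =>
          if ((d.get? k).elim false (fun obs =>
                ((PySem.Dict.mk obs).get? "type").any (fun t => pvBlockingSet.contains t))) then
            PySem.Set.discard s (some k.1, some k.2)
          else s) candidates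
      -- for s in all_snakes: for p in s.get('path', []): candidates.discard(get_rc(p))
      let c2 := all_snakes.foldl (fun s sn =>
          ((PySem.Dict.mk sn).getD "path" []).foldl
            (fun s p => PySem.Set.discard s (pvRC p)) s) c1
      !c2.isEmpty)))          -- 'return bool(candidates)'
    -- the 'elim false' defaults are Python's TypeError point (None - 1); excluded by Pre_

-- ===== PRECONDITION & SPEC =====
-- Pre_ excludes only inputs where Python A raises TypeError: a nonempty path whose head
-- point lacks a 'row' or 'col' key (None - 1 in the neighbors list).
def Pre_check_movable (snake : List (String × List (List (String × Int)))) (all_snakes : List (List (String × List (List (String × Int))))) (obstacles_map : List (Int × Int × List (String × String))) (rows : Int) (cols : Int) : Prop :=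
  (((PySem.Dict.mk snake).getD "path" []).getLast?.all (fun head =>
    ((PySem.Dict.mk head).get? "row").isSome && ((PySem.Dict.mk head).get? "col").isSome)) = true
instance (snake : List (String × List (List (String × Int)))) (all_snakes : List (List (String × List (List (String × Int))))) (obstacles_map : List (Int × Int × List (String × String))) (rows : Int) (cols : Int) : Decidable (Pre_check_movable snake all_snakes obstacles_map rows cols) := by unfold Pre_check_movable; infer_instance

def pvWitness_check_movable : (List (String × List (List (String × Int)))) × (List (List (String × List (List (String × Int))))) × (List (Int × Int × List (String × String))) × Int × Int :=
  ([("path", [[("row", 0), ("col", 0)]])], [[("path", [[("row", 0), ("col", 1)]])]], [(1, 0, [("type", "wall")])], 2, 2)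

def Spec_check_movable (snake : List (String × List (List (String × Int)))) (all_snakes : List (List (String × List (List (String × Int))))) (obstacles_map : List (Int × Int × List (String × String))) (rows : Int) (cols : Int) (out : Bool) : Prop := out = check_movable_alt snake all_snakes obstacles_map rows cols
instance (snake : List (String × List (List (String × Int)))) (all_snakes : List (List (String × List (List (String × Int))))) (obstacles_map : List (Int × Int × List (String × String))) (rows : Int) (cols : Int) (out : Bool) : Decidable (Spec_check_movable snake all_snakes obstacles_map rows cols out) := by unfold Spec_check_movable; infer_instance

-- ===== CLAIM (what is proved, stated in full; the proofs are below) =====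
def Claim_equal_check_movable : Prop := ∀ (snake : List (String × List (List (String × Int)))) (all_snakes : List (List (String × List (List (String × Int))))) (obstacles_map : List (Int × Int × List (String × String))) (rows : Int) (cols : Int), Dom_check_movable snake all_snakes obstacles_map rows cols → Pre_check_movable snake all_snakes obstacles_map rows cols → Spec_check_movable snake all_snakes obstacles_map rows cols (check_movable snake all_snakes obstacles_map rows cols)

-- ===== LEMMAS AND PROOFS =====

-- A's four-way disjunction equals B's blocking-set membership
theorem pv_obs_eq (obs : List (String × String)) :
    pvObsBlocks obs = ((PySem.Dict.mk obs).get? "type").any (fun t => pvBlockingSet.contains t) := by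
  cases h : (PySem.Dict.mk obs).get? "type" with
  | none => simp [pvObsBlocks, h]
  | some t => simp [pvObsBlocks, h, pvBlockingSet, PySem.Set.contains, pysem, Bool.beq_eq_decide_eq, Bool.or_assoc]

-- A's early-return loop returns true iff some neighbor passes all three tests
theorem pv_loopA_iff (ss : List (List (String × List (List (String × Int)))))
    (om : List (Int × Int × List (String × String))) (rows cols : Int) (nbrs : List (Int × Int)) :
    pvLoopA ss om rows cols nbrs = true ↔
      ∃ q ∈ nbrs, (0 ≤ q.1 ∧ q.1 < rows ∧ 0 ≤ q.2 ∧ q.2 < cols) ∧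
        (match pvObsLookup? om q.1 q.2 with
         | some obs => pvObsBlocks obs
         | none => false) = false ∧
        pvBlockedBySnake ss q.1 q.2 = false := by
  induction nbrs with
  | nil => simp [pvLoopA]
  | cons q rest ih =>
    obtain ⟨nr, nc⟩ := q
    by_cases hb : nr < 0 ∨ rows ≤ nr ∨ nc < 0 ∨ cols ≤ nc
    · have h1 : (decide (nr < 0) || decide (rows ≤ nr) || decide (nc < 0) || decide (cols ≤ nc)) = true := by
        simp only [Bool.or_eq_true, decide_eq_true_eq]; tauto
      simp only [pvLoopA, h1, if_true, ih, List.mem_cons]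
      constructor
      · rintro ⟨q, hq, h⟩; exact ⟨q, Or.inr hq, h⟩
      · rintro ⟨q, hq | hq, h⟩
        · subst hq; exact absurd h.1 (by omega)
        · exact ⟨q, hq, h⟩
    · push_neg at hb
      have h1 : (decide (nr < 0) || decide (rows ≤ nr) || decide (nc < 0) || decide (cols ≤ nc)) = false := by
        simp only [Bool.or_eq_false_iff, decide_eq_false_iff_not]; omega
      simp only [pvLoopA, h1, Bool.false_eq_true, if_false]
      cases hC : (match pvObsLookup? om nr nc with
                  | some obs => pvObsBlocks obs
                  | none => false) with
      | true =>
        simp only [if_true, ih, List.mem_cons]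
        constructor
        · rintro ⟨q, hq, h⟩; exact ⟨q, Or.inr hq, h⟩
        · rintro ⟨q, hq | hq, h⟩
          · subst hq; rw [hC] at h; exact absurd h.2.1 (by simp)
          · exact ⟨q, hq, h⟩
      | false =>
        cases hS : pvBlockedBySnake ss nr nc with
        | true =>
          simp only [if_true, Bool.false_eq_true, if_false, ih, List.mem_cons]
          constructor
          · rintro ⟨q, hq, h⟩; exact ⟨q, Or.inr hq, h⟩
          · rintro ⟨q, hq | hq, h⟩
            · subst hq; rw [hS] at h; exact absurd h.2.2 (by simp)
            · exact ⟨q, hq, h⟩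
        | false =>
          simp only [Bool.false_eq_true, if_false, List.mem_cons]
          constructor
          · intro _; exact ⟨(nr, nc), Or.inl rfl, ⟨by omega, by omega, by omega, by omega⟩, hC, hS⟩
          · intro _; trivial

-- membership after a conditional-discard fold
theorem pv_mem_foldl_discard_if {α δ : Type} [BEq α] [LawfulBEq α]
    (l : List δ) (p : δ → Bool) (f : δ → α) (s0 : PySem.Set α) (y : α) :
    y ∈ l.foldl (fun s b => if p b then PySem.Set.discard s (f b) else s) s0 ↔
      y ∈ s0 ∧ ∀ b ∈ l, p b = true → f b ≠ y := by
  induction l generalizing s0 with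
  | nil => simp
  | cons b rest ih =>
    simp only [List.foldl_cons, List.mem_cons]
    cases hp : p b with
    | true =>
      rw [if_pos rfl, ih]
      simp only [PySem.Set.mem_discard]
      constructor
      · rintro ⟨⟨hy, hne⟩, hrest⟩
        exact ⟨hy, fun b' hb' hp' => by
          rcases hb' with hb' | hb'
          · subst hb'; exact fun h => hne h.symm
          · exact hrest b' hb' hp'⟩
      · rintro ⟨hy, hall⟩
        exact ⟨⟨hy, fun h => hall b (Or.inl rfl) hp h.symm⟩,
               fun b' hb' hp' => hall b' (Or.inr hb') hp'⟩
    | false =>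
      rw [if_neg (by simp [hp]), ih]
      constructor
      · rintro ⟨hy, hrest⟩
        exact ⟨hy, fun b' hb' hp' => by
          rcases hb' with hb' | hb'
          · subst hb'; rw [hp] at hp'; exact absurd hp' (by simp)
          · exact hrest b' hb' hp'⟩
      · rintro ⟨hy, hall⟩; exact ⟨hy, fun b' hb' hp' => hall b' (Or.inr hb') hp'⟩

-- membership after an unconditional-discard fold
theorem pv_mem_foldl_discard {α δ : Type} [BEq α] [LawfulBEq α]
    (l : List δ) (f : δ → α) (s0 : PySem.Set α) (y : α) :
    y ∈ l.foldl (fun s b => PySem.Set.discard s (f b)) s0 ↔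
      y ∈ s0 ∧ ∀ b ∈ l, f b ≠ y := by
  induction l generalizing s0 with
  | nil => simp
  | cons b rest ih =>
    simp only [List.foldl_cons, List.mem_cons, ih, PySem.Set.mem_discard]
    constructor
    · rintro ⟨⟨hy, hne⟩, hrest⟩
      exact ⟨hy, fun b' hb' => by
        rcases hb' with hb' | hb'
        · subst hb'; exact fun h => hne h.symm
        · exact hrest b' hb'⟩
    · rintro ⟨hy, hall⟩
      exact ⟨⟨hy, fun h => hall b (Or.inl rfl) h.symm⟩, fun b' hb' => hall b' (Or.inr hb')⟩

-- membership after the nested discard fold over snakes and their paths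
theorem pv_mem_foldl_foldl_discard {α γ δ : Type} [BEq α] [LawfulBEq α]
    (l : List γ) (g : γ → List δ) (f : δ → α) (s0 : PySem.Set α) (y : α) :
    y ∈ l.foldl (fun s c => (g c).foldl (fun s b => PySem.Set.discard s (f b)) s) s0 ↔
      y ∈ s0 ∧ ∀ c ∈ l, ∀ b ∈ g c, f b ≠ y := by
  induction l generalizing s0 with
  | nil => simp
  | cons c rest ih =>
    simp only [List.foldl_cons, List.mem_cons, ih, pv_mem_foldl_discard]
    constructor
    · rintro ⟨⟨hy, hc⟩, hrest⟩
      exact ⟨hy, fun c' hc' => by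
        rcases hc' with hc' | hc'
        · subst hc'; exact hc
        · exact hrest c' hc'⟩
    · rintro ⟨hy, hall⟩
      exact ⟨⟨hy, hall c (Or.inl rfl)⟩, fun c' hc' => hall c' (Or.inr hc')⟩

-- pvRC and pvGetRC are the same normalization
theorem pv_rc_eq (p : List (String × Int)) : pvRC p = pvGetRC p := rfl

-- the blocking-condition holds only on actual keys of the obstacles dict
theorem pv_cond_mem_keys (om : List (Int × Int × List (String × String))) (k : Int × Int)
    (h : ((PySem.Dict.mk (om.map (fun t => ((t.1, t.2.1), t.2.2)))).get? k).elim false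
           (fun obs => ((PySem.Dict.mk obs).get? "type").any (fun t => pvBlockingSet.contains t)) = true) :
    k ∈ (PySem.Dict.mk (om.map (fun t => ((t.1, t.2.1), t.2.2)))).keys := by
  cases hg : (PySem.Dict.mk (om.map (fun t => ((t.1, t.2.1), t.2.2)))).get? k with
  | none =>
    rw [hg] at h; exact absurd h (by simp)
  | some v =>
    have := PySem.Dict.get?_eq_none_iff_not_mem_keys
      (d := PySem.Dict.mk (om.map (fun t => ((t.1, t.2.1), t.2.2)))) (k := k)
    by_contra hk
    rw [this.mpr hk] at hg
    exact absurd hg (by simp)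

-- ===== VERDICT (by name: the statement is the Claim_ definition above) =====
theorem check_movable_spec : Claim_equal_check_movable := by
  intro snake all_snakes obstacles_map rows cols _hdom hpre
  unfold Spec_check_movable check_movable check_movable_alt
  rcases hlast : ((PySem.Dict.mk snake).getD "path" []).getLast? with _ | head
  · simp [hlast]
  · unfold Pre_check_movable at hpre
    rw [hlast] at hpre
    simp only [Option.all_some, Bool.and_eq_true, Option.isSome_iff_exists] at hpre
    obtain ⟨⟨hr, hrow⟩, ⟨hc, hcol⟩⟩ := hpre
    have hrc : pvGetRC head = (some hr, some hc) := by simp [pvGetRC, hrow, hcol]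
    have hrc' : pvRC head = (some hr, some hc) := hrc
    have h1 : (pvRC head).1 = some hr := by rw [hrc']
    have h2 : (pvRC head).2 = some hc := by rw [hrc']
    simp only [hlast, hrc, h1, h2, Option.elim_some]
    -- both sides are now closed Bool expressions over the same data; compare via ↔
    rw [Bool.eq_iff_iff]
    set d := PySem.Dict.mk (obstacles_map.map (fun t => ((t.1, t.2.1), t.2.2))) with hd
    set nbrs : List (Int × Int) := [(hr - 1, hc), (hr + 1, hc), (hr, hc - 1), (hr, hc + 1)] with hnbrs
    rw [pv_loopA_iff]
    rw [Bool.not_eq_true', List.isEmpty_eq_false_iff_exists_mem]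
    constructor
    · -- A movable → a candidate survives in B
      rintro ⟨q, hq, hin, hobs, hsnk⟩
      refine ⟨(some q.1, some q.2), ?_⟩
      rw [pv_mem_foldl_foldl_discard, pv_mem_foldl_discard_if]
      refine ⟨⟨?_, ?_⟩, ?_⟩
      · rw [PySem.Set.mem_ofList, List.mem_map]
        refine ⟨q, ?_, rfl⟩
        rw [List.mem_filter]
        exact ⟨hq, by simp only [Bool.and_eq_true, decide_eq_true_eq]; omega⟩
      · intro k _ hcond hkq
        have hkeq : k = q := by
          have h1 : some k.1 = some q.1 := congrArg Prod.fst hkq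
          have h2 : some k.2 = some q.2 := congrArg Prod.snd hkq
          exact Prod.ext (Option.some.inj h1) (Option.some.inj h2)
        subst hkeq
        have : (match pvObsLookup? obstacles_map k.1 k.2 with
                | some obs => pvObsBlocks obs
                | none => false) = true := by
          unfold pvObsLookup?
          rw [← hd]
          cases hg : d.get? (k.1, k.2) with
          | none => rw [hg] at hcond; exact absurd hcond (by simp)
          | some obs =>
            rw [hg] at hcond
            simp only [Option.elim_some] at hcond
            simpa [pv_obs_eq] using hcond
        rw [this] at hobs; exact absurd hobs (by simp)
      · intro sn hsn p hp hpq
        have : pvBlockedBySnake all_snakes q.1 q.2 = true := by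
          unfold pvBlockedBySnake
          rw [List.any_eq_true]
          exact ⟨sn, hsn, by rw [List.any_eq_true]; exact ⟨p, hp, by rw [← pv_rc_eq, hpq]; simp⟩⟩
        rw [this] at hsnk; exact absurd hsnk (by simp)
    · -- a candidate survives in B → A movable
      rintro ⟨y, hy⟩
      rw [pv_mem_foldl_foldl_discard, pv_mem_foldl_discard_if] at hy
      obtain ⟨⟨hy0, hobsall⟩, hsnkall⟩ := hy
      rw [PySem.Set.mem_ofList, List.mem_map] at hy0
      obtain ⟨q, hqf, hyq⟩ := hy0
      rw [List.mem_filter] at hqf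
      obtain ⟨hq, hinb⟩ := hqf
      simp only [Bool.and_eq_true, decide_eq_true_eq] at hinb
      refine ⟨q, hq, ⟨by omega, by omega, by omega, by omega⟩, ?_, ?_⟩
      · cases hC : (match pvObsLookup? obstacles_map q.1 q.2 with
                    | some obs => pvObsBlocks obs
                    | none => false) with
        | false => rfl
        | true =>
          exfalso
          have hcond : (d.get? (q.1, q.2)).elim false
              (fun obs => ((PySem.Dict.mk obs).get? "type").any (fun t => pvBlockingSet.contains t)) = true := by
            unfold pvObsLookup? at hC
            rw [← hd] at hC
            cases hg : d.get? (q.1, q.2) with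
            | none => rw [hg] at hC; exact absurd hC (by simp)
            | some obs =>
              rw [hg] at hC
              simpa [pv_obs_eq] using hC
          have hkmem : (q.1, q.2) ∈ d.keys := pv_cond_mem_keys obstacles_map (q.1, q.2) (by rw [← hd]; exact hcond)
          exact hobsall (q.1, q.2) hkmem hcond (by rw [← hyq])
      · cases hS : pvBlockedBySnake all_snakes q.1 q.2 with
        | false => rfl
        | true =>
          exfalso
          unfold pvBlockedBySnake at hS
          rw [List.any_eq_true] at hS
          obtain ⟨sn, hsn, hsna⟩ := hS
          rw [List.any_eq_true] at hsna
          obtain ⟨p, hp, hpb⟩ := hsna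
          have : pvGetRC p = (some q.1, some q.2) := by simpa using hpb
          exact hsnkall sn hsn p hp (by rw [pv_rc_eq, this, hyq])
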